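-- pv_equiv track=rewrite | github.com/Mauriceter/AEM-GraphQL | AEM-GraphQL.py | parse_verbose_options
-- ===== SOURCE A (Python) =====
-- def parse_verbose_options(verbose_str):
--     """Parse verbose options string like 'q,v,r' into a dict of booleans"""
--     if not verbose_str:
--         return {'query': False, 'variables': False, 'response': False}
--
--     options = [opt.strip().lower() for opt in verbose_str.split(',')]
--     return {
--         'query': 'q' in options,
--         'variables': 'v' in options,
--         'response': 'r' in options
--     }
-- ===== SOURCE B (Python) =====
-- def parse_verbose_options(verbose_str):
--     """Parse verbose options string like 'q,v,r' into a dict of booleans"""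
--     result = {'query': False, 'variables': False, 'response': False}
--     if not verbose_str:
--         return result
--     m = {'q': 'query', 'v': 'variables', 'r': 'response'}
--     for opt in verbose_str.split(','):
--         key = m.get(opt.strip().lower())
--         if key is not None:
--             result[key] = True
--     return result
-- ===== Notes on version B (the rewrite author's own statement) =====
-- stated objective: idiomatic
-- what changed: One accumulation pass over the split tokens with a dispatch table setting flags in a pre-initialized dict, instead of building a normalized list and doing three separate membership scans.
import Mathlib
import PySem

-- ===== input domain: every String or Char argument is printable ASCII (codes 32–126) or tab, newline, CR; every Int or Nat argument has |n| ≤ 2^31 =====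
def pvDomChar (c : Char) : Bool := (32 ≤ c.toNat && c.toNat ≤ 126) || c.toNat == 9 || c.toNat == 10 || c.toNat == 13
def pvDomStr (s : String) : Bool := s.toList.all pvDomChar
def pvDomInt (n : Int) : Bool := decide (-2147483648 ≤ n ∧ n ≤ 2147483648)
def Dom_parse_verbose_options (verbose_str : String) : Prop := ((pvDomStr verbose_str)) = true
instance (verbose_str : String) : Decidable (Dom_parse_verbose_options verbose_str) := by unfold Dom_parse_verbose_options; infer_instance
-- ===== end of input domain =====

-- B replaces three membership scans over a normalized token list by one accumulation
-- pass with a dispatch table (idiomatic single-pass decomposition; same asymptotic cost).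


-- ===== PORT A =====
def parse_verbose_options (verbose_str : String) : List (String × Bool) :=
  if verbose_str = "" then
    [("query", false), ("variables", false), ("response", false)]
  else
    let options := ((PySem.Str.split? verbose_str ",").getD []).map
      (fun opt => PySem.Str.lower (PySem.Str.strip opt))
    [("query", options.contains "q"),
     ("variables", options.contains "v"),
     ("response", options.contains "r")]

-- ===== PORT B =====
-- loop body of B: look the normalized token up in the dispatch table, set the flag if found
def pvoStep (m : PySem.Dict String String) (res : PySem.Dict String Bool) (opt : String) :
    PySem.Dict String Bool :=
  match m.get? (PySem.Str.lower (PySem.Str.strip opt)) with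
  | some key => res.insert key true
  | none => res

def parse_verbose_options_alt (verbose_str : String) : List (String × Bool) :=
  let result : PySem.Dict String Bool :=
    PySem.Dict.mk [("query", false), ("variables", false), ("response", false)]
  if verbose_str = "" then result.items
  else
    let m : PySem.Dict String String :=
      PySem.Dict.mk [("q", "query"), ("v", "variables"), ("r", "response")]
    (((PySem.Str.split? verbose_str ",").getD []).foldl (pvoStep m) result).items

-- ===== PRECONDITION & SPEC =====
def Spec_parse_verbose_options (verbose_str : String) (out : List (String × Bool)) : Prop := out = parse_verbose_options_alt verbose_str
instance (verbose_str : String) (out : List (String × Bool)) : Decidable (Spec_parse_verbose_options verbose_str out) := by unfold Spec_parse_verbose_options; infer_instance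

-- ===== CLAIM (what is proved, stated in full; the proofs are below) =====
def Claim_equal_parse_verbose_options : Prop := ∀ (verbose_str : String), Dom_parse_verbose_options verbose_str → Spec_parse_verbose_options verbose_str (parse_verbose_options verbose_str)

-- ===== LEMMAS AND PROOFS =====

-- invariant of B's single pass: folding pvoStep over the tokens sets each flag
-- exactly when the normalized token list contains the corresponding letter
theorem pvoStep_foldl (opts : List String) (q v r : Bool) :
    (opts.foldl (pvoStep (PySem.Dict.mk [("q", "query"), ("v", "variables"), ("r", "response")]))
      (PySem.Dict.mk [("query", q), ("variables", v), ("response", r)])).items =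
    [("query", q || (opts.map (fun o => PySem.Str.lower (PySem.Str.strip o))).contains "q"),
     ("variables", v || (opts.map (fun o => PySem.Str.lower (PySem.Str.strip o))).contains "v"),
     ("response", r || (opts.map (fun o => PySem.Str.lower (PySem.Str.strip o))).contains "r")] := by
  induction opts generalizing q v r with
  | nil => simp
  | cons a tl ih =>
    simp only [List.foldl_cons, List.map_cons, List.contains_cons]
    by_cases hq : PySem.Str.lower (PySem.Str.strip a) = "q"
    · simp [pvoStep, hq, PySem.Dict.get?, PySem.Dict.insert, ih]
    · by_cases hv : PySem.Str.lower (PySem.Str.strip a) = "v"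
      · simp [pvoStep, hv, PySem.Dict.get?, PySem.Dict.insert, ih]
      · by_cases hr : PySem.Str.lower (PySem.Str.strip a) = "r"
        · simp [pvoStep, hr, PySem.Dict.get?, PySem.Dict.insert, ih]
        · have e1 : (("q" : String) == PySem.Str.lower (PySem.Str.strip a)) = false :=
            beq_eq_false_iff_ne.mpr (Ne.symm hq)
          have e2 : (("v" : String) == PySem.Str.lower (PySem.Str.strip a)) = false :=
            beq_eq_false_iff_ne.mpr (Ne.symm hv)
          have e3 : (("r" : String) == PySem.Str.lower (PySem.Str.strip a)) = false :=
            beq_eq_false_iff_ne.mpr (Ne.symm hr)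
          simp [pvoStep, PySem.Dict.get?, List.find?, e1, e2, e3, ih]

-- ===== VERDICT (by name: the statement is the Claim_ definition above) =====
theorem parse_verbose_options_spec : Claim_equal_parse_verbose_options := by
  intro s _
  unfold Spec_parse_verbose_options parse_verbose_options parse_verbose_options_alt
  by_cases h : s = ""
  · simp [h]
  · simp only [h, if_false]
    rw [pvoStep_foldl]
    simp
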